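-- pv_equiv track=rewrite | github.com/phppk/qr_code_generator | qr_code_calc.py | generate_error_correction_bits
-- ===== SOURCE A (Python) =====
-- def gf_mul(a, b, exp_table, log_table):
--     if a == 0 or b == 0:
--         return 0
--     return exp_table[(log_table[a] + log_table[b]) % 255]
--
-- def build_gf_tables():
--     exp_table = [0] * 512
--     log_table = [0] * 256
--     x = 1
--     for i in range(255):
--         exp_table[i] = x
--         log_table[x] = i
--         x <<= 1
--         if x & 0x100:
--             x ^= 0x11D
--     for i in range(255, 512):
--         exp_table[i] = exp_table[i - 255]
--     return exp_table, log_table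
--
-- def rs_generator_poly(ec_len, exp_table, log_table):
--     generator = [1]
--     for i in range(ec_len):
--         factor = [1, exp_table[i]]
--         result = [0] * (len(generator) + 1)
--         for gi, gv in enumerate(generator):
--             result[gi] ^= gf_mul(gv, factor[0], exp_table, log_table)
--             result[gi + 1] ^= gf_mul(gv, factor[1], exp_table, log_table)
--         generator = result
--     return generator
--
-- def generate_error_correction_bits(byte_string):
--     ec_len = 15
--     exp_table, log_table = build_gf_tables()
--     generator = rs_generator_poly(ec_len, exp_table, log_table)
--
--     # Polynom Division in Galois Field 256
--     remainder = [0] * ec_len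
--     for data_byte in byte_string:
--         factor = data_byte ^ remainder[0]
--         remainder = remainder[1:] + [0]
--         if factor != 0:
--             for i in range(ec_len):
--                 remainder[i] ^= gf_mul(generator[i + 1], factor, exp_table, log_table)
--
--     return "".join(f"{byte:08b}" for byte in remainder)
-- ===== SOURCE B (Python) =====
-- def xtime(x):
--     x <<= 1
--     if x & 0x100:
--         x ^= 0x11D
--     return x
--
-- def build_tables():
--     exp = [1]
--     for _ in range(254):
--         exp.append(xtime(exp[-1]))
--     log = [0] * 256
--     for i, v in enumerate(exp):
--         log[v] = i
--     return exp, log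
--
-- def gf_mult(a, b, exp, log):
--     return exp[(log[a] + log[b]) % 255] if a and b else 0
--
-- def poly_mult(p, q, exp, log):
--     out = [0] * (len(p) + len(q) - 1)
--     for i, pv in enumerate(p):
--         for j, qv in enumerate(q):
--             out[i + j] ^= gf_mult(pv, qv, exp, log)
--     return out
--
-- def generate_error_correction_bits(byte_string):
--     ec_len = 15
--     exp, log = build_tables()
--     generator = [1]
--     for i in range(ec_len):
--         generator = poly_mult(generator, [1, exp[i]], exp, log)
--
--     # Full-buffer polynomial long division indexed by absolute offset.
--     working = list(byte_string) + [0] * ec_len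
--     for i in range(len(byte_string)):
--         coef = working[i]
--         if coef != 0:
--             for j in range(len(generator)):
--                 working[i + j] ^= gf_mult(generator[j], coef, exp, log)
--
--     remainder = working[len(byte_string):]
--     return "".join(f"{byte:08b}" for byte in remainder)
-- ===== Notes on version B (the rewrite author's own statement) =====
-- stated objective: alternative
-- what changed: B rebuilds the GF(256) tables by successive append (exp[-1] doubling) plus an enumerate pass for logs instead of A's preallocated 512/256 arrays, constructs the generator with a general polynomial-convolution helper instead of A's hard-wired two-term step, and replaces A's sliding 15-byte remainder register with classic polynomial long division over one full-length working buffer indexed by absolute offset.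
import Mathlib
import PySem

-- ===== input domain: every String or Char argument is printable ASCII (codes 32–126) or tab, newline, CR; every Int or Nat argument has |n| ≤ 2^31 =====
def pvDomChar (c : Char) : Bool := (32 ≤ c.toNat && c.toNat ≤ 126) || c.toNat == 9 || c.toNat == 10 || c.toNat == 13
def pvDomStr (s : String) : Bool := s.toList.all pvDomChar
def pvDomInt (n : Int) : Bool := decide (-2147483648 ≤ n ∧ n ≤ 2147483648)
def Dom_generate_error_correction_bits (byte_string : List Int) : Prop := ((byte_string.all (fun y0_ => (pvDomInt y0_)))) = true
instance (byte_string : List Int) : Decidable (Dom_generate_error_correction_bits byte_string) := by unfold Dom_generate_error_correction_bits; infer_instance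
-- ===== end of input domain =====

set_option maxRecDepth 4000

-- B rebuilds the GF tables by append-and-enumerate (no 512-slot doubling array), builds the
-- generator with a general polynomial-convolution helper, and divides by classic long division
-- over one full-length working buffer indexed by absolute offset (alternative decomposition).

-- ===== PORT A =====
-- shared module helper of Source A
def gf_mul (a b : Int) (exp_table log_table : List Int) : Int :=
  if a = 0 ∨ b = 0 then 0
  else PySem.List.pyGetD exp_table
    (PySem.Int.mod (PySem.List.pyGetD log_table a 0 + PySem.List.pyGetD log_table b 0) 255) 0

-- body of the first 'for i in range(255)' loop of build_gf_tables
def gfTabStep (s : List Int × List Int × Int) (i : Int) : List Int × List Int × Int :=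
  let e := PySem.List.pySetD s.1 i s.2.2
  let l := PySem.List.pySetD s.2.1 s.2.2 i
  let x := s.2.2 <<< (1 : Nat)
  let x := if PySem.Int.band x 0x100 ≠ 0 then PySem.Int.bxor x 0x11D else x
  (e, l, x)

-- body of the second 'for i in range(255, 512)' loop of build_gf_tables
def gfCopyStep (e : List Int) (i : Int) : List Int :=
  PySem.List.pySetD e i (PySem.List.pyGetD e (i - 255) 0)

def build_gf_tables : List Int × List Int :=
  let s := (PySem.List.pyRange 0 255 1).foldl gfTabStep
    (PySem.List.pyRepeat [0] 512, PySem.List.pyRepeat [0] 256, 1)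
  let exp2 := (PySem.List.pyRange 255 512 1).foldl gfCopyStep s.1
  (exp2, s.2.1)

-- body of the 'for i in range(ec_len)' loop of rs_generator_poly
def genPolyStep (exp_table log_table generator : List Int) (i : Int) : List Int :=
  let factor : List Int := [1, PySem.List.pyGetD exp_table i 0]
  let result : List Int := PySem.List.pyRepeat [0] ((generator.length : Int) + 1)
  (PySem.List.enumerate generator).foldl
    (fun result gv =>
      let r1 := PySem.List.pySetD result gv.1
        (PySem.Int.bxor (PySem.List.pyGetD result gv.1 0)
          (gf_mul gv.2 (PySem.List.pyGetD factor 0 0) exp_table log_table))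
      PySem.List.pySetD r1 (gv.1 + 1)
        (PySem.Int.bxor (PySem.List.pyGetD r1 (gv.1 + 1) 0)
          (gf_mul gv.2 (PySem.List.pyGetD factor 1 0) exp_table log_table)))
    result

def rs_generator_poly (ec_len : Int) (exp_table log_table : List Int) : List Int :=
  (PySem.List.pyRange 0 ec_len 1).foldl (genPolyStep exp_table log_table) [1]

-- f"{byte:08b}": minimum-width-8 zero-padded binary, sign first (exact for every Int);
-- shared by both ports because both pythons format the remainder with the same f-string
def format08b (n : Int) : List Char :=
  if n < 0 then
    '-' :: (List.replicate (8 - ((PySem.Int.toBinChars (-n)).length + 1)) '0' ++ PySem.Int.toBinChars (-n))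
  else List.replicate (8 - (PySem.Int.toBinChars n).length) '0' ++ PySem.Int.toBinChars n

-- body of A's 'for data_byte in byte_string' loop
def ecStepA (generator exp_table log_table rem : List Int) (data_byte : Int) : List Int :=
  let factor := PySem.Int.bxor data_byte (PySem.List.pyGetD rem 0 0)
  let rem' := PySem.List.slice rem (some 1) none ++ [0]
  if factor ≠ 0 then
    (PySem.List.pyRange 0 15 1).foldl
      (fun r i => PySem.List.pySetD r i
        (PySem.Int.bxor (PySem.List.pyGetD r i 0)
          (gf_mul (PySem.List.pyGetD generator (i + 1) 0) factor exp_table log_table))) rem'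
  else rem'

def generate_error_correction_bits (byte_string : List Int) : String :=
  let ec_len : Int := 15
  let tables := build_gf_tables
  let exp_table := tables.1
  let log_table := tables.2
  let generator := rs_generator_poly ec_len exp_table log_table
  let remainder := byte_string.foldl (ecStepA generator exp_table log_table)
    (PySem.List.pyRepeat [0] ec_len)
  String.ofList (remainder.map format08b).flatten

-- ===== PORT B =====
def xtime (x : Int) : Int :=
  let x := x <<< (1 : Nat)
  if PySem.Int.band x 0x100 ≠ 0 then PySem.Int.bxor x 0x11D else x

def build_tables : List Int × List Int :=
  let exp := (PySem.List.pyRange 0 254 1).foldl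
    (fun e _ => e ++ [xtime (PySem.List.pyGetD e (-1) 0)]) [1]
  let log := (PySem.List.enumerate exp).foldl
    (fun l iv => PySem.List.pySetD l iv.2 iv.1) (PySem.List.pyRepeat [0] 256)
  (exp, log)

def gf_mult (a b : Int) (exp log : List Int) : Int :=
  if a ≠ 0 ∧ b ≠ 0 then
    PySem.List.pyGetD exp
      (PySem.Int.mod (PySem.List.pyGetD log a 0 + PySem.List.pyGetD log b 0) 255) 0
  else 0

def poly_mult (p q exp log : List Int) : List Int :=
  (PySem.List.enumerate p).foldl (fun out ip =>
    (PySem.List.enumerate q).foldl (fun out jq =>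
      PySem.List.pySetD out (ip.1 + jq.1)
        (PySem.Int.bxor (PySem.List.pyGetD out (ip.1 + jq.1) 0) (gf_mult ip.2 jq.2 exp log)))
      out)
    (PySem.List.pyRepeat [0] ((p.length : Int) + (q.length : Int) - 1))

-- body of B's 'for i in range(len(byte_string))' long-division loop
def ecStepB (generator exp log w : List Int) (i : Int) : List Int :=
  let coef := PySem.List.pyGetD w i 0
  if coef ≠ 0 then
    (PySem.List.pyRange 0 (generator.length : Int) 1).foldl
      (fun w2 j => PySem.List.pySetD w2 (i + j)
        (PySem.Int.bxor (PySem.List.pyGetD w2 (i + j) 0)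
          (gf_mult (PySem.List.pyGetD generator j 0) coef exp log))) w
  else w

def generate_error_correction_bits_alt (byte_string : List Int) : String :=
  let ec_len : Int := 15
  let tables := build_tables
  let exp := tables.1
  let log := tables.2
  let generator := (PySem.List.pyRange 0 ec_len 1).foldl
    (fun gen i => poly_mult gen [1, PySem.List.pyGetD exp i 0] exp log) [1]
  let working := byte_string ++ PySem.List.pyRepeat [0] ec_len
  let working := (PySem.List.pyRange 0 (byte_string.length : Int) 1).foldl
    (ecStepB generator exp log) working
  let remainder := PySem.List.slice working (some (byte_string.length : Int)) none
  String.ofList (remainder.map format08b).flatten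

-- ===== PRECONDITION & SPEC =====
-- Pre_ excludes exactly the inputs on which the Python A raises IndexError
-- (any byte outside [-256, 255] makes log_table[...] an out-of-range subscript).
def Pre_generate_error_correction_bits (byte_string : List Int) : Prop :=
  ∀ b ∈ byte_string, -256 ≤ b ∧ b ≤ 255
instance (byte_string : List Int) : Decidable (Pre_generate_error_correction_bits byte_string) := by
  unfold Pre_generate_error_correction_bits; infer_instance

def pvWitness_generate_error_correction_bits : List Int := [64, 0, 255, -3]

def Spec_generate_error_correction_bits (byte_string : List Int) (out : String) : Prop := out = generate_error_correction_bits_alt byte_string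
instance (byte_string : List Int) (out : String) : Decidable (Spec_generate_error_correction_bits byte_string out) := by unfold Spec_generate_error_correction_bits; infer_instance

-- ===== CLAIM (what is proved, stated in full; the proofs are below) =====
def Claim_equal_generate_error_correction_bits : Prop := ∀ (byte_string : List Int), Dom_generate_error_correction_bits byte_string → Pre_generate_error_correction_bits byte_string → Spec_generate_error_correction_bits byte_string (generate_error_correction_bits byte_string)

-- ===== LEMMAS AND PROOFS =====

-- the powers of α that both table constructions enumerate
def powα : Nat → Int
  | 0 => 1
  | k + 1 => xtime (powα k)

def Epart (k : Nat) : List Int := (List.range k).map powα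

def Lfold (k : Nat) : List Int :=
  (List.range k).foldl (fun l i => PySem.List.pySetD l (powα i) ((i : Nat) : Int)) (List.replicate 256 0)

theorem length_Epart (k : Nat) : (Epart k).length = k := by simp [Epart]

-- B's exp loop: appending xtime(exp[-1]) n times from [1] yields the powα prefix
theorem expB_fold (l : List Int) :
    (l.foldl (fun e _ => e ++ [xtime (PySem.List.pyGetD e (-1) 0)]) [1]) = Epart (l.length + 1) := by
  induction l using List.reverseRecOn with
  | nil => simp [Epart, powα]
  | append_singleton l a ih =>
    rw [List.foldl_append, ih]
    simp only [List.foldl_cons, List.foldl_nil]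
    have hne : Epart (l.length + 1) ≠ [] := by
      intro h
      have := length_Epart (l.length + 1)
      rw [h] at this
      simp at this
    rw [PySem.List.pyGetD_neg_one _ _ hne]
    have hlast : (Epart (l.length + 1)).getLast hne = powα l.length := by
      simp only [Epart, List.range_succ, List.map_append]
      simp
    rw [hlast]
    have h2 : (l ++ [a]).length + 1 = (l.length + 1) + 1 := by simp
    rw [h2]
    show Epart (l.length + 1) ++ [xtime (powα l.length)] = Epart ((l.length + 1) + 1)
    unfold Epart
    rw [List.range_succ (n := l.length + 1), List.map_append]
    rfl

theorem expB_raw :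
    ((PySem.List.pyRange 0 254 1).foldl
      (fun e _ => e ++ [xtime (PySem.List.pyGetD e (-1) 0)]) [1]) = Epart 255 := by
  rw [expB_fold]
  congr 1

theorem expB_eq : build_tables.1 = Epart 255 := by
  unfold build_tables
  dsimp only
  exact expB_raw

-- the enumerate-driven log loop is the index-driven set loop
theorem enum_fold (g : Nat → Int) :
    ∀ (n s : Nat) (l : List Int),
    (PySem.List.enumerate ((List.range' s n).map g) ((s : Nat) : Int)).foldl
        (fun l iv => PySem.List.pySetD l iv.2 iv.1) l
    = (List.range' s n).foldl (fun l i => PySem.List.pySetD l (g i) ((i : Nat) : Int)) l := by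
  intro n
  induction n with
  | zero => intro s l; simp [PySem.List.enumerate_nil]
  | succ n ih =>
    intro s l
    rw [List.range'_succ]
    simp only [List.map_cons, PySem.List.enumerate_cons, List.foldl_cons]
    have hcast : ((s : Nat) : Int) + 1 = (((s + 1 : Nat)) : Int) := by push_cast; ring
    rw [hcast]
    exact ih (s + 1) _

-- characterization of A's first table loop
theorem A_fold_char : ∀ n : Nat, n ≤ 255 →
    (PySem.List.pyRange 0 ((n : Nat) : Int) 1).foldl gfTabStep
      (List.replicate 512 0, List.replicate 256 0, 1)
    = (Epart n ++ List.replicate (512 - n) 0, Lfold n, powα n) := by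
  intro n
  induction n with
  | zero =>
    intro _
    simp only [Nat.cast_zero, PySem.List.pyRange_zero]
    rfl
  | succ n ih =>
    intro hn
    have hr : PySem.List.pyRange 0 ((n + 1 : Nat) : Int) 1
        = PySem.List.pyRange 0 ((n : Nat) : Int) 1 ++ [((n : Nat) : Int)] := by
      push_cast
      exact PySem.List.pyRange_one_succ_right (by omega)
    rw [hr, List.foldl_append, ih (by omega)]
    simp only [List.foldl_cons, List.foldl_nil]
    unfold gfTabStep
    simp only
    refine Prod.ext ?_ (Prod.ext ?_ ?_)
    · -- exp component
      show PySem.List.pySetD (Epart n ++ List.replicate (512 - n) 0) ((n : Nat) : Int) (powα n)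
          = Epart (n + 1) ++ List.replicate (512 - (n + 1)) 0
      rw [PySem.List.pySetD_natCast]
      have hrep : List.replicate (512 - n) (0 : Int) = 0 :: List.replicate (512 - (n + 1)) 0 := by
        have : 512 - n = (512 - (n + 1)) + 1 := by omega
        rw [this, List.replicate_succ]
      rw [hrep]
      rw [List.set_append_right _ _ (by simp [length_Epart])]
      simp only [length_Epart, Nat.sub_self, List.set_cons_zero]
      simp only [Epart, List.range_succ, List.map_append, List.map_cons, List.map_nil,
        List.append_assoc, List.cons_append, List.nil_append]
    · -- log component
      show PySem.List.pySetD (Lfold n) (powα n) ((n : Nat) : Int) = Lfold (n + 1)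
      unfold Lfold
      rw [List.range_succ, List.foldl_append]
      simp
    · -- running power
      show (if PySem.Int.band (powα n <<< (1 : Nat)) 0x100 ≠ 0
            then PySem.Int.bxor (powα n <<< (1 : Nat)) 0x11D
            else powα n <<< (1 : Nat)) = powα (n + 1)
      rfl

theorem A_tables_char :
    (PySem.List.pyRange 0 255 1).foldl gfTabStep
      (PySem.List.pyRepeat [0] 512, PySem.List.pyRepeat [0] 256, 1)
    = (Epart 255 ++ List.replicate 257 0, Lfold 255, powα 255) := by
  have h1 : PySem.List.pyRepeat [(0 : Int)] 512 = List.replicate 512 0 := by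
    rw [PySem.List.pyRepeat_singleton]; rfl
  have h2 : PySem.List.pyRepeat [(0 : Int)] 256 = List.replicate 256 0 := by
    rw [PySem.List.pyRepeat_singleton]; rfl
  have h3 : (255 : Int) = ((255 : Nat) : Int) := by norm_num
  rw [h1, h2, h3, A_fold_char 255 (by omega)]

theorem log_eq : build_tables.2 = build_gf_tables.2 := by
  have hB : build_tables.2
      = (PySem.List.enumerate (Epart 255)).foldl
          (fun l iv => PySem.List.pySetD l iv.2 iv.1) (List.replicate 256 0) := by
    unfold build_tables
    dsimp only
    rw [expB_raw]
    congr 1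
  rw [hB]
  have hA : build_gf_tables.2 = Lfold 255 := by
    unfold build_gf_tables
    dsimp only
    rw [A_tables_char]
  rw [hA]
  unfold Lfold
  rw [List.range_eq_range']
  have := enum_fold powα 255 0 (List.replicate 256 0)
  simpa [Epart, List.range_eq_range'] using this

-- the copy loop does not touch the first 255 slots
theorem take_set_of_le (e : List Int) (k : Nat) (v : Int) (h : 255 ≤ k) :
    (e.set k v).take 255 = e.take 255 := by
  apply List.ext_getElem (by simp)
  intro i h1 h2
  simp only [List.getElem_take, List.getElem_set]
  have : ¬ (k = i) := by
    intro he
    subst he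
    have := List.length_take_le 255 (e.set k v)
    omega
  simp [this]

theorem copy_preserve : ∀ (l : List Int), (∀ i ∈ l, (255 : Int) ≤ i) → ∀ e : List Int,
    (l.foldl gfCopyStep e).take 255 = e.take 255 ∧ (l.foldl gfCopyStep e).length = e.length := by
  intro l
  induction l with
  | nil => intro _ e; exact ⟨rfl, rfl⟩
  | cons a l ih =>
    intro hmem e
    have ha : (255 : Int) ≤ a := hmem a (by simp)
    have hstep : (gfCopyStep e a).take 255 = e.take 255 ∧ (gfCopyStep e a).length = e.length := by
      unfold gfCopyStep
      rw [PySem.List.pySetD_of_nonneg _ _ (by omega : (0:Int) ≤ a)]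
      constructor
      · exact take_set_of_le e a.toNat _ (by omega)
      · simp
    rw [List.foldl_cons]
    obtain ⟨h1, h2⟩ := ih (fun i hi => hmem i (by simp [hi])) (gfCopyStep e a)
    exact ⟨h1.trans hstep.1, h2.trans hstep.2⟩

theorem expA_char : build_gf_tables.1.take 255 = Epart 255 ∧ build_gf_tables.1.length = 512 := by
  unfold build_gf_tables
  dsimp only
  rw [A_tables_char]
  obtain ⟨h1, h2⟩ := copy_preserve (PySem.List.pyRange 255 512 1)
    (fun i hi => ((PySem.List.mem_pyRange_one).mp hi).1)
    (Epart 255 ++ List.replicate 257 0)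
  refine ⟨?_, ?_⟩
  · rw [h1, List.take_append_of_le_length (by simp [length_Epart]), List.take_of_length_le (by simp [length_Epart])]
  · rw [h2]; simp [length_Epart]

theorem expB_take : build_tables.1 = build_gf_tables.1.take 255 := by
  rw [expB_eq, expA_char.1]

theorem getD_prefix (i d : Int) (h0 : 0 ≤ i) (h1 : i < 255) :
    PySem.List.pyGetD build_tables.1 i d = PySem.List.pyGetD build_gf_tables.1 i d := by
  rw [expB_take]
  have hlenB : (build_gf_tables.1.take 255).length = 255 := by
    rw [List.length_take]
    simp [expA_char.2]
  rw [PySem.List.pyGetD_eq_getElem _ _ h0 (by rw [hlenB]; exact_mod_cast h1),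
      PySem.List.pyGetD_eq_getElem _ _ h0 (by rw [expA_char.2]; exact_mod_cast (by omega : i < (512:Int)))]
  exact List.getElem_take

theorem gf_eq (a b : Int) :
    gf_mult a b build_tables.1 build_tables.2
    = gf_mul a b build_gf_tables.1 build_gf_tables.2 := by
  unfold gf_mult gf_mul
  by_cases h : a = 0 ∨ b = 0
  · rw [if_pos h, if_neg (by tauto)]
  · rw [if_neg h, if_pos (by tauto), log_eq]
    exact getD_prefix _ _ (PySem.Int.mod_nonneg _ (by norm_num)) (PySem.Int.mod_lt _ (by norm_num))

theorem polymul_eq (p : List Int) (i : Int) (h0 : 0 ≤ i) (h1 : i < 255) :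
    poly_mult p [1, PySem.List.pyGetD build_tables.1 i 0] build_tables.1 build_tables.2
    = genPolyStep build_gf_tables.1 build_gf_tables.2 p i := by
  unfold poly_mult genPolyStep
  rw [getD_prefix i 0 h0 h1]
  simp only [PySem.List.enumerate_cons, PySem.List.enumerate_nil, List.foldl_cons, List.foldl_nil,
    List.length_cons, List.length_nil]
  have hinit : PySem.List.pyRepeat [(0 : Int)] ((p.length : Int) + ((0 + 1 + 1 : Nat) : Int) - 1)
      = PySem.List.pyRepeat [(0 : Int)] ((p.length : Int) + 1) := by
    congr 1
    push_cast
    ring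
  rw [hinit]
  congr 1
  funext out ip
  simp only [gf_eq, add_zero, zero_add]
  rw [show PySem.List.pyGetD [(1 : Int), PySem.List.pyGetD build_gf_tables.1 i 0] 0 0 = 1 from
        PySem.List.pyGetD_zero_cons _ _ _,
      show PySem.List.pyGetD [(1 : Int), PySem.List.pyGetD build_gf_tables.1 i 0] 1 0
          = PySem.List.pyGetD build_gf_tables.1 i 0 from by
        simp [PySem.List.pyGetD_ofNat']]

theorem gen_eq :
    (PySem.List.pyRange 0 15 1).foldl
      (fun gen i => poly_mult gen [1, PySem.List.pyGetD build_tables.1 i 0]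
        build_tables.1 build_tables.2) [1]
    = rs_generator_poly 15 build_gf_tables.1 build_gf_tables.2 := by
  unfold rs_generator_poly
  apply PySem.List.foldl_congr_mem
  intro acc a ha
  obtain ⟨ha0, ha1⟩ := PySem.List.mem_pyRange_one.mp ha
  exact polymul_eq acc a ha0 (by omega)

-- the proof-side normal form of B's division step, phrased over A's tables
def ecStepN (generator exp_table log_table w : List Int) (i : Int) : List Int :=
  let coef := PySem.List.pyGetD w i 0
  if coef ≠ 0 then
    (PySem.List.pyRange 0 (generator.length : Int) 1).foldl
      (fun w2 j => PySem.List.pySetD w2 (i + j)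
        (PySem.Int.bxor (PySem.List.pyGetD w2 (i + j) 0)
          (gf_mul (PySem.List.pyGetD generator j 0) coef exp_table log_table))) w
  else w

theorem ecStepB_eq (g : List Int) :
    ecStepB g build_tables.1 build_tables.2
    = ecStepN g build_gf_tables.1 build_gf_tables.2 := by
  funext w i
  unfold ecStepB ecStepN
  simp only [gf_eq]

theorem bxor_zero_left (a : Int) : PySem.Int.bxor 0 a = a := by
  rw [PySem.Int.bxor_comm]; exact PySem.Int.bxor_zero a
theorem bxor_nonneg (a b : Int) (ha : 0 ≤ a) (hb : 0 ≤ b) : 0 ≤ PySem.Int.bxor a b := by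
  simp [PySem.Int.bxor, ha, hb]
theorem bxor_assoc_nonneg (a b c : Int) (hb : 0 ≤ b) (hc : 0 ≤ c) :
    PySem.Int.bxor (PySem.Int.bxor a b) c = PySem.Int.bxor a (PySem.Int.bxor b c) := by
  rcases le_or_gt 0 a with ha | ha
  · simp [PySem.Int.bxor, ha, hb, hc, Nat.xor_assoc]
  · have ha' : ¬ (0 ≤ a) := by omega
    simp only [PySem.Int.bxor, if_pos hb, if_pos hc, if_neg ha']
    have h1 : ¬ (0 ≤ -(((-a - 1).toNat ^^^ b.toNat : Nat) : Int) - 1) := by omega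
    simp only [if_pos (Int.natCast_nonneg _), if_neg h1]
    have h2 : (-(-(((-a - 1).toNat ^^^ b.toNat : Nat) : Int) - 1) - 1).toNat
        = (-a - 1).toNat ^^^ b.toNat := by omega
    rw [h2]
    simp [Nat.xor_assoc]
def mixP : List Int → List Int → List Int
  | [], xs => xs
  | _ :: _, [] => []
  | r :: rs, x :: xs => PySem.Int.bxor x r :: mixP rs xs
theorem length_mixP (rs xs : List Int) : (mixP rs xs).length = xs.length := by
  induction rs generalizing xs with
  | nil => rfl
  | cons r rs ih => cases xs with
    | nil => rfl
    | cons x xs => simp [mixP, ih]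
theorem mixP_append_zero (rs xs : List Int) : mixP (rs ++ [0]) xs = mixP rs xs := by
  induction rs generalizing xs with
  | nil => cases xs with
    | nil => rfl
    | cons x xs => simp [mixP, PySem.Int.bxor_zero]
  | cons r rs ih => cases xs with
    | nil => rfl
    | cons x xs => simp [mixP, ih]
theorem mixP_zero_left (n : Nat) (xs : List Int) : mixP (List.replicate n 0) xs = xs := by
  induction n generalizing xs with
  | zero => rfl
  | succ n ih => cases xs with
    | nil => rfl
    | cons x xs => simp [List.replicate_succ, mixP, ih]
theorem mixP_zero_right (rs : List Int) (n : Nat) (h : rs.length = n) :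
    mixP rs (List.replicate n 0) = rs := by
  induction rs generalizing n with
  | nil => cases n with
    | zero => rfl
    | succ n => simp at h
  | cons r rs ih =>
    cases n with
    | zero => simp at h
    | succ n =>
      rw [List.replicate_succ]
      show PySem.Int.bxor 0 r :: mixP rs (List.replicate n 0) = r :: rs
      rw [bxor_zero_left, ih n (by simpa using h)]
theorem mem_pySetD {xs : List Int} {i v a : Int} (ha : a ∈ PySem.List.pySetD xs i v) : a ∈ xs ∨ a = v := by
  unfold PySem.List.pySetD PySem.List.pySet? at ha
  rcases h : PySem.List.pyIdx? xs.length i with _ | k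
  · rw [h] at ha; simp at ha; exact Or.inl ha
  · rw [h] at ha; simp at ha
    rcases List.mem_or_eq_of_mem_set ha with h' | h'
    · exact Or.inl h'
    · exact Or.inr h'
theorem getElem_mixP (rs xs : List Int) (k : Nat) (hk : k < xs.length)
    (hk' : k < (mixP rs xs).length) :
    (mixP rs xs)[k] = if h : k < rs.length then PySem.Int.bxor xs[k] rs[k] else xs[k] := by
  induction rs generalizing xs k with
  | nil => simp [mixP]
  | cons r rs ih =>
    cases xs with
    | nil => simp at hk
    | cons x xs =>
      cases k with
      | zero => simp [mixP]
      | succ k =>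
        simp only [mixP, List.getElem_cons_succ]
        rw [ih xs k (by simpa using hk) (by simpa [length_mixP] using hk)]
        simp
theorem mapIdx_set_step (F : Int → Int) (s : List Int) (m : Nat) (hm : m < s.length) :
    ((s.mapIdx fun k x => if k < m then PySem.Int.bxor x (F k) else x).set m
        (PySem.Int.bxor (s[m]'hm) (F m)))
    = s.mapIdx (fun k x => if k < m + 1 then PySem.Int.bxor x (F k) else x) := by
  apply List.ext_getElem (by simp)
  intro k hk1 hk2
  simp only [List.getElem_set, List.getElem_mapIdx]
  by_cases hkm : k = m
  · subst hkm; simp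
  · have hmk : ¬ (m = k) := fun h => hkm h.symm
    simp only [if_neg hmk]
    by_cases h : k < m
    · have h1 : k < m + 1 := by omega
      simp [h, h1]
    · have h1 : ¬ (k < m + 1) := by omega
      simp [h, h1]
theorem foldSet_char (F : Int → Int) (s : List Int) (m : Nat) (hm : m ≤ s.length) :
    (PySem.List.pyRange 0 (m : Int) 1).foldl
      (fun r i => PySem.List.pySetD r i
        (PySem.Int.bxor (PySem.List.pyGetD r i 0) (F i))) s
    = s.mapIdx (fun k x => if k < m then PySem.Int.bxor x (F k) else x) := by
  induction m with
  | zero =>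
    simp only [Int.natCast_zero, PySem.List.pyRange_zero]
    apply List.ext_getElem (by simp)
    intro k hk1 hk2
    simp [List.getElem_mapIdx]
  | succ m ih =>
    have hr : PySem.List.pyRange 0 ((m + 1 : Nat) : Int) 1
        = PySem.List.pyRange 0 (m : Int) 1 ++ [(m : Int)] := by
      push_cast
      exact PySem.List.pyRange_one_succ_right (by omega)
    rw [hr, List.foldl_append, ih (by omega)]
    simp only [List.foldl_cons, List.foldl_nil]
    set X := s.mapIdx (fun k x => if k < m then PySem.Int.bxor x (F k) else x) with hX
    have hlen : X.length = s.length := by simp [hX]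
    have hmX : m < X.length := by omega
    have hsm : m < s.length := by omega
    have hget : PySem.List.pyGetD X (m : Int) 0 = s[m]'hsm := by
      rw [PySem.List.pyGetD_natCast, List.getD_eq_getElem X 0 hmX]
      simp [hX]
    rw [hget, PySem.List.pySetD_natCast]
    exact mapIdx_set_step F s m hsm
theorem foldSet_shift (F : Int → Int) (junk s : List Int) (m : Nat) (hm : m ≤ s.length) :
    (PySem.List.pyRange 0 (m : Int) 1).foldl
      (fun w j => PySem.List.pySetD w ((junk.length : Int) + j)
        (PySem.Int.bxor (PySem.List.pyGetD w ((junk.length : Int) + j) 0) (F j))) (junk ++ s)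
    = junk ++ s.mapIdx (fun k x => if k < m then PySem.Int.bxor x (F k) else x) := by
  induction m with
  | zero =>
    simp
    apply List.ext_getElem (by simp)
    intro k hk1 hk2
    simp [List.getElem_mapIdx]
  | succ m ih =>
    have hr : PySem.List.pyRange 0 ((m + 1 : Nat) : Int) 1
        = PySem.List.pyRange 0 (m : Int) 1 ++ [(m : Int)] := by
      push_cast
      exact PySem.List.pyRange_one_succ_right (by omega)
    rw [hr, List.foldl_append, ih (by omega)]
    simp only [List.foldl_cons, List.foldl_nil]
    set X := s.mapIdx (fun k x => if k < m then PySem.Int.bxor x (F k) else x) with hX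
    have hlenX : X.length = s.length := by simp [hX]
    have hcast : (junk.length : Int) + (m : Int) = ((junk.length + m : Nat) : Int) := by push_cast; ring
    have hmX : junk.length + m < (junk ++ X).length := by simp [hlenX]; omega
    have hsm : m < s.length := by omega
    have hget : PySem.List.pyGetD (junk ++ X) ((junk.length : Int) + (m : Int)) 0 = s[m]'hsm := by
      rw [hcast, PySem.List.pyGetD_natCast, List.getD_eq_getElem _ 0 hmX]
      rw [List.getElem_append_right (by omega)]
      simp [hX]
    rw [hget, hcast, PySem.List.pySetD_natCast]
    rw [List.set_append_right _ _ (by omega)]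
    congr 1
    have : junk.length + m - junk.length = m := by omega
    rw [this]
    exact mapIdx_set_step F s m hsm
theorem mix_update (rs T : List Int) (G : Nat → Int) (m : Nat) (hrs : rs.length + 1 = m)
    (hr : ∀ r ∈ rs, 0 ≤ r) (hG : ∀ k, 0 ≤ G k) :
    (mixP rs T).mapIdx (fun k x => if k < m then PySem.Int.bxor x (G k) else x)
    = mixP ((rs ++ [0]).mapIdx (fun k x => if k < m then PySem.Int.bxor x (G k) else x)) T := by
  apply List.ext_getElem (by simp [length_mixP])
  intro k hk1 hk2
  have hkT : k < T.length := by simpa [length_mixP] using hk2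
  rw [List.getElem_mapIdx, getElem_mixP _ _ _ hkT (by simpa [length_mixP] using hk1),
      getElem_mixP _ _ _ hkT hk2]
  by_cases h1 : k < rs.length
  · have hklt : k < m := by omega
    rw [dif_pos h1, dif_pos (by simp; omega), if_pos hklt, List.getElem_mapIdx, if_pos hklt,
        List.getElem_append_left h1]
    exact bxor_assoc_nonneg _ _ _ (hr _ (List.getElem_mem h1)) (hG k)
  · by_cases h2 : k + 1 = m
    · have h1' : k = rs.length := by omega
      rw [dif_neg h1, dif_pos (by simp; omega), if_pos (by omega), List.getElem_mapIdx, if_pos (by omega)]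
      rw [List.getElem_append_right (by omega)]
      simp only [h1']
      simp [bxor_zero_left]
    · rw [dif_neg h1, dif_neg (by simp; omega), if_neg (by omega)]
theorem pyGetD_nonneg (xs : List Int) (i d : Int) (hxs : ∀ v ∈ xs, 0 ≤ v) (hd : 0 ≤ d) :
    0 ≤ PySem.List.pyGetD xs i d := by
  rcases h : PySem.List.pyGet? xs i with _ | v
  · simp [PySem.List.pyGetD, h, hd]
  · have : PySem.List.pyGetD xs i d = v := by simp [PySem.List.pyGetD, h]
    rw [this]
    exact hxs v (PySem.List.mem_of_pyGet?_eq_some _ h)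
theorem gf_mul_nonneg (a b : Int) (E L : List Int) (hE : ∀ v ∈ E, 0 ≤ v) :
    0 ≤ gf_mul a b E L := by
  unfold gf_mul
  split
  · exact le_refl 0
  · exact pyGetD_nonneg _ _ _ hE (le_refl 0)
theorem pyGetD_append_length (pre : List Int) (y : Int) (ys : List Int) (d : Int) :
    PySem.List.pyGetD (pre ++ y :: ys) ((pre.length : Int)) d = y := by
  simp [PySem.List.pyGetD]

theorem foldl_inv {α β : Type} (P : β → Prop) (f : β → α → β)
    (h : ∀ acc a, P acc → P (f acc a)) : ∀ (l : List α) (acc : β), P acc → P (l.foldl f acc) := by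
  intro l
  induction l with
  | nil => intro acc hacc; exact hacc
  | cons a l ih => intro acc hacc; exact ih _ (h _ _ hacc)
theorem foldl_len {α : Type} (f : List Int → α → List Int)
    (h : ∀ acc a, (f acc a).length = acc.length + 1) :
    ∀ (l : List α) (acc : List Int), (l.foldl f acc).length = acc.length + l.length := by
  intro l
  induction l with
  | nil => intro acc; simp
  | cons a l ih => intro acc; rw [List.foldl_cons, ih, h]; simp; omega

theorem exp_nonneg : ∀ v ∈ build_gf_tables.1, 0 ≤ v := by
  have hstep : ∀ (acc : List Int × List Int × Int) (a : Int),
      ((∀ v ∈ acc.1, 0 ≤ v) ∧ 0 ≤ acc.2.2) →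
      ((∀ v ∈ (gfTabStep acc a).1, 0 ≤ v) ∧ 0 ≤ (gfTabStep acc a).2.2) := by
    intro acc a hacc
    unfold gfTabStep
    refine ⟨?_, ?_⟩
    · intro v hv
      rcases mem_pySetD hv with h | h
      · exact hacc.1 v h
      · omega
    · show 0 ≤ if PySem.Int.band (acc.2.2 <<< (1:Nat)) 0x100 ≠ 0
          then PySem.Int.bxor (acc.2.2 <<< (1:Nat)) 0x11D else (acc.2.2 <<< (1:Nat))
      have hx : 0 ≤ acc.2.2 <<< (1:Nat) := by
        rw [Int.shiftLeft_eq]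
        exact mul_nonneg hacc.2 (by positivity)
      split
      · exact bxor_nonneg _ _ hx (by norm_num)
      · exact hx
  have base := foldl_inv (fun s : List Int × List Int × Int => (∀ v ∈ s.1, 0 ≤ v) ∧ 0 ≤ s.2.2)
    gfTabStep hstep
    (PySem.List.pyRange 0 255 1)
    (PySem.List.pyRepeat [0] 512, PySem.List.pyRepeat [0] 256, 1)
    (by
      refine ⟨?_, by norm_num⟩
      intro v hv
      rw [PySem.List.pyRepeat_singleton, List.mem_replicate] at hv
      omega)
  have final := foldl_inv (fun e : List Int => ∀ v ∈ e, 0 ≤ v)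
    gfCopyStep
    (fun acc a hacc => by
      unfold gfCopyStep
      intro v hv
      rcases mem_pySetD hv with h | h
      · exact hacc v h
      · subst h; exact pyGetD_nonneg _ _ _ hacc le_rfl)
    (PySem.List.pyRange 255 512 1) _ base.1
  unfold build_gf_tables
  dsimp only
  exact final

theorem genPolyStep_length (E L generator : List Int) (i : Int) :
    (genPolyStep E L generator i).length = generator.length + 1 := by
  unfold genPolyStep
  have hpres := foldl_inv (fun r : List Int => r.length = generator.length + 1)
    (fun result (gv : Int × Int) =>
      let r1 := PySem.List.pySetD result gv.1
        (PySem.Int.bxor (PySem.List.pyGetD result gv.1 0)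
          (gf_mul gv.2 (PySem.List.pyGetD [1, PySem.List.pyGetD E i 0] 0 0) E L))
      PySem.List.pySetD r1 (gv.1 + 1)
        (PySem.Int.bxor (PySem.List.pyGetD r1 (gv.1 + 1) 0)
          (gf_mul gv.2 (PySem.List.pyGetD [1, PySem.List.pyGetD E i 0] 1 0) E L)))
    (fun acc a hacc => by
      show (PySem.List.pySetD _ _ _).length = _
      rw [PySem.List.length_pySetD, PySem.List.length_pySetD]
      exact hacc)
    (PySem.List.enumerate generator)
    (PySem.List.pyRepeat [0] ((generator.length : Int) + 1))
    (by
      rw [PySem.List.pyRepeat_singleton]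
      show (List.replicate ((generator.length : Int) + 1).toNat (0:Int)).length = generator.length + 1
      rw [List.length_replicate]
      omega)
  exact hpres

theorem gen_length (E L : List Int) : (rs_generator_poly 15 E L).length = 16 := by
  unfold rs_generator_poly
  rw [foldl_len (genPolyStep E L) (genPolyStep_length E L) (PySem.List.pyRange 0 15 1) [1]]
  rw [PySem.List.length_pyRange_one]
  rfl
theorem loop_equiv (g E L : List Int) (hg : g.length = 16) (hE : ∀ v ∈ E, 0 ≤ v) :
    ∀ (bs junk rem : List Int), rem.length = 15 → (∀ r ∈ rem, 0 ≤ r) →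
    ∃ junk' : List Int, junk'.length = junk.length + bs.length ∧
      (PySem.List.pyRange (junk.length : Int) ((junk.length + bs.length : Nat) : Int) 1).foldl
        (ecStepN g E L) (junk ++ mixP rem (bs ++ List.replicate 15 0))
      = junk' ++ mixP (bs.foldl (ecStepA g E L) rem) (List.replicate 15 0) := by
  intro bs
  induction bs with
  | nil =>
    intro junk rem hlen hnn
    exact ⟨junk, by simp, by simp⟩
  | cons b bs ih =>
    intro junk rem hlen hnn
    rcases rem with _ | ⟨r0, rtl⟩
    · simp at hlen
    have hrtl : rtl.length = 14 := by simpa using hlen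
    have hcons : PySem.List.pyRange (junk.length : Int) ((junk.length + (b :: bs).length : Nat) : Int) 1
        = (junk.length : Int) :: PySem.List.pyRange ((junk.length : Int) + 1) ((junk.length + (b :: bs).length : Nat) : Int) 1 := by
      apply PySem.List.pyRange_one_cons
      simp only [List.length_cons]
      push_cast
      omega
    rw [hcons, List.foldl_cons]
    set T := bs ++ List.replicate 15 0 with hT
    have hmix : mixP (r0 :: rtl) ((b :: bs) ++ List.replicate 15 0)
        = PySem.Int.bxor b r0 :: mixP rtl T := by
      simp [mixP, hT]
    rw [hmix]
    have hcoef : PySem.List.pyGetD (junk ++ PySem.Int.bxor b r0 :: mixP rtl T) ((junk.length : Int)) 0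
        = PySem.Int.bxor b r0 := pyGetD_append_length _ _ _ _
    have hfacA : PySem.List.pyGetD (r0 :: rtl) 0 0 = r0 := by
      simp [PySem.List.pyGetD_zero_cons]
    by_cases hz : PySem.Int.bxor b r0 = 0
    · have hstepB : ecStepN g E L (junk ++ PySem.Int.bxor b r0 :: mixP rtl T) ((junk.length : Int))
          = junk ++ PySem.Int.bxor b r0 :: mixP rtl T := by
        unfold ecStepN
        simp only [hz]
        simp
      have hstepA : ecStepA g E L (r0 :: rtl) b = rtl ++ [0] := by
        unfold ecStepA
        simp only [hfacA, hz, PySem.List.slice_from_one]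
        simp
      rw [hstepB, List.foldl_cons, hstepA]
      have hw : junk ++ PySem.Int.bxor b r0 :: mixP rtl T
          = (junk ++ [PySem.Int.bxor b r0]) ++ mixP (rtl ++ [0]) (bs ++ List.replicate 15 0) := by
        rw [mixP_append_zero]
        simp [hT]
      rw [hw]
      obtain ⟨junk', hj1, hj2⟩ := ih (junk ++ [PySem.Int.bxor b r0]) (rtl ++ [0])
        (by simp [hrtl]) (by
          intro r hr
          rcases List.mem_append.mp hr with h | h
          · exact hnn r (List.mem_cons_of_mem _ h)
          · simp at h; omega)
      refine ⟨junk', by simp at hj1 ⊢; omega, ?_⟩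
      rw [← hj2]
      have e1 : ((junk.length : Int) + 1) = (((junk ++ [PySem.Int.bxor b r0]).length : Nat) : Int) := by
        simp
      have e2 : ((junk.length + (b :: bs).length : Nat) : Int)
          = (((junk ++ [PySem.Int.bxor b r0]).length + bs.length : Nat) : Int) := by
        simp
        ring
      rw [e1, e2]
    · have hrnn : ∀ r ∈ rtl, 0 ≤ r := fun r h => hnn r (List.mem_cons_of_mem _ h)
      have hG : ∀ k : Nat, 0 ≤ gf_mul (PySem.List.pyGetD g ((k : Int) + 1) 0) (PySem.Int.bxor b r0) E L :=
        fun k => gf_mul_nonneg _ _ _ _ hE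
      have hstepA : ecStepA g E L (r0 :: rtl) b
          = (rtl ++ [0]).mapIdx (fun k x => if k < 15 then
              PySem.Int.bxor x (gf_mul (PySem.List.pyGetD g ((k : Int) + 1) 0) (PySem.Int.bxor b r0) E L) else x) := by
        unfold ecStepA
        simp only [hfacA, PySem.List.slice_from_one, List.tail_cons, if_pos hz]
        rw [show (15:Int) = ((15:Nat):Int) from by norm_num]
        rw [foldSet_char (fun i => gf_mul (PySem.List.pyGetD g (i + 1) 0) (PySem.Int.bxor b r0) E L)
            (rtl ++ [0]) 15 (by simp [hrtl])]
      have hstepB : ecStepN g E L (junk ++ PySem.Int.bxor b r0 :: mixP rtl T) ((junk.length : Int))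
          = (junk ++ [PySem.Int.bxor (PySem.Int.bxor b r0)
                (gf_mul (PySem.List.pyGetD g 0 0) (PySem.Int.bxor b r0) E L)])
            ++ mixP ((rtl ++ [0]).mapIdx (fun k x => if k < 15 then
                PySem.Int.bxor x (gf_mul (PySem.List.pyGetD g ((k : Int) + 1) 0) (PySem.Int.bxor b r0) E L) else x)) T := by
        unfold ecStepN
        simp only [hcoef, if_pos hz, hg]
        rw [foldSet_shift (fun j => gf_mul (PySem.List.pyGetD g j 0) (PySem.Int.bxor b r0) E L)
            junk (PySem.Int.bxor b r0 :: mixP rtl T) 16 (by simp [hT, length_mixP])]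
        rw [List.mapIdx_cons]
        have hfun : (fun (i : Nat) (x : Int) => if i + 1 < 16 then
              PySem.Int.bxor x (gf_mul (PySem.List.pyGetD g ((i + 1 : Nat) : Int) 0) (PySem.Int.bxor b r0) E L) else x)
            = (fun (k : Nat) (x : Int) => if k < 15 then
              PySem.Int.bxor x (gf_mul (PySem.List.pyGetD g ((k : Int) + 1) 0) (PySem.Int.bxor b r0) E L) else x) := by
          funext k x
          by_cases h : k < 15
          · rw [if_pos (by omega), if_pos h]
            norm_num
          · rw [if_neg (by omega), if_neg h]
        rw [hfun, mix_update rtl T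
          (fun k => gf_mul (PySem.List.pyGetD g ((k : Int) + 1) 0) (PySem.Int.bxor b r0) E L)
          15 (by omega) hrnn hG]
        simp
      rw [hstepB, List.foldl_cons, hstepA]
      obtain ⟨junk', hj1, hj2⟩ := ih
        (junk ++ [PySem.Int.bxor (PySem.Int.bxor b r0)
          (gf_mul (PySem.List.pyGetD g 0 0) (PySem.Int.bxor b r0) E L)])
        ((rtl ++ [0]).mapIdx (fun k x => if k < 15 then
          PySem.Int.bxor x (gf_mul (PySem.List.pyGetD g ((k : Int) + 1) 0) (PySem.Int.bxor b r0) E L) else x))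
        (by simp [hrtl])
        (by
          intro r hr
          rw [List.mem_iff_getElem] at hr
          obtain ⟨k, hk, hr⟩ := hr
          rw [List.getElem_mapIdx] at hr
          subst hr
          have hx : (0:Int) ≤ (rtl ++ [0])[k]'(by simpa using hk) := by
            rcases List.mem_append.mp (List.getElem_mem _) with h | h
            · exact hrnn _ h
            · simp at h; omega
          split
          · exact bxor_nonneg _ _ hx (hG k)
          · exact hx)
      refine ⟨junk', by simp at hj1 ⊢; omega, ?_⟩
      rw [← hj2]
      have e1 : ((junk.length : Int) + 1)
          = (((junk ++ [PySem.Int.bxor (PySem.Int.bxor b r0)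
              (gf_mul (PySem.List.pyGetD g 0 0) (PySem.Int.bxor b r0) E L)]).length : Nat) : Int) := by
        simp
      have e2 : ((junk.length + (b :: bs).length : Nat) : Int)
          = (((junk ++ [PySem.Int.bxor (PySem.Int.bxor b r0)
              (gf_mul (PySem.List.pyGetD g 0 0) (PySem.Int.bxor b r0) E L)]).length + bs.length : Nat) : Int) := by
        simp
        ring
      rw [e1, e2]

theorem ecStepA_length (g E L rem : List Int) (b : Int) (h : rem.length = 15) :
    (ecStepA g E L rem b).length = 15 := by
  unfold ecStepA
  dsimp only
  have hbase : (PySem.List.slice rem (some 1) none ++ [(0:Int)]).length = 15 := by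
    rw [PySem.List.slice_from_one]
    simp [List.length_tail, h]
  split
  · exact foldl_inv (fun r : List Int => r.length = 15)
      _ (fun acc a hacc => by
        show (PySem.List.pySetD _ _ _).length = 15
        rw [PySem.List.length_pySetD]
        exact hacc)
      (PySem.List.pyRange 0 15 1) _ hbase
  · exact hbase

theorem foldl_ecStepA_length (g E L : List Int) :
    ∀ (bs rem : List Int), rem.length = 15 → (bs.foldl (ecStepA g E L) rem).length = 15 := by
  intro bs
  induction bs with
  | nil => intro rem h; exact h
  | cons b bs ih => intro rem h; exact ih _ (ecStepA_length g E L rem b h)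

-- ===== VERDICT (by name: the statement is the Claim_ definition above) =====
theorem generate_error_correction_bits_spec : Claim_equal_generate_error_correction_bits := by
  unfold Claim_equal_generate_error_correction_bits
  intro bs _ _
  unfold Spec_generate_error_correction_bits
  unfold generate_error_correction_bits generate_error_correction_bits_alt
  dsimp only
  rw [gen_eq, ecStepB_eq]
  have hrep : PySem.List.pyRepeat [(0:Int)] (15:Int) = List.replicate 15 (0:Int) := by
    rw [PySem.List.pyRepeat_singleton]
    rfl
  have hg := gen_length build_gf_tables.1 build_gf_tables.2
  have hE := exp_nonneg
  obtain ⟨junk', hj1, hj2⟩ := loop_equiv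
    (rs_generator_poly 15 build_gf_tables.1 build_gf_tables.2)
    build_gf_tables.1 build_gf_tables.2 hg hE bs [] (List.replicate 15 0)
    (by simp) (by intro r hr; rw [List.mem_replicate] at hr; omega)
  rw [hrep]
  have hstart : bs ++ List.replicate 15 (0:Int)
      = [] ++ mixP (List.replicate 15 0) (bs ++ List.replicate 15 0) := by
    rw [mixP_zero_left]
    simp
  have hrange : PySem.List.pyRange 0 ((bs.length : Nat) : Int) 1
      = PySem.List.pyRange ((([] : List Int).length : Nat) : Int)
          (((([] : List Int).length + bs.length : Nat)) : Int) 1 := by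
    norm_num
  rw [hstart, hrange, hj2]
  have hremlen : (bs.foldl (ecStepA (rs_generator_poly 15 build_gf_tables.1 build_gf_tables.2)
      build_gf_tables.1 build_gf_tables.2) (List.replicate 15 0)).length = 15 :=
    foldl_ecStepA_length _ _ _ bs _ (by simp)
  rw [mixP_zero_right _ _ hremlen]
  have hslice : PySem.List.slice (junk' ++ (bs.foldl (ecStepA (rs_generator_poly 15 build_gf_tables.1 build_gf_tables.2)
        build_gf_tables.1 build_gf_tables.2) (List.replicate 15 0))) (some ((bs.length : Nat) : Int)) none
      = bs.foldl (ecStepA (rs_generator_poly 15 build_gf_tables.1 build_gf_tables.2)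
        build_gf_tables.1 build_gf_tables.2) (List.replicate 15 0) := by
    rw [PySem.List.slice_from_natCast]
    have : bs.length = junk'.length := by simpa using hj1.symm
    rw [this, List.drop_left]
  rw [hslice]
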